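-- pv_equiv track=rewrite | github.com/morganrivers/forecasting_policy_impact | scripts/count_abstracts_with_interventions_past_2021.py | is_excludable_year_mention
-- ===== SOURCE A (Python) =====
-- def is_excludable_year_mention(text: str, year: int) -> bool:
--     """
--     Returns True if the year is part of a known copyright/publisher-style phrase.
--     """
--     year_str = str(year)
--     patterns = [
--         f"(c) {year_str}",
--         f"© {year_str}",
--         f"{year_str} elsevier",
--         f"{year_str} the authors",
--         f"{year_str} western social science",
--         f"{year_str} wiley",
--         f"{year_str} taylor & francis",
--         f"{year_str} springer",
--         f"{year_str} sage",
--         f"{year_str} oxford university press",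
--         f"{year_str} academic press",
--     ]
--     text_lower = text.lower()
--     return any(pat in text_lower for pat in patterns)
-- ===== SOURCE B (Python) =====
-- _SUFFIXES = (
--     " elsevier",
--     " the authors",
--     " western social science",
--     " wiley",
--     " taylor & francis",
--     " springer",
--     " sage",
--     " oxford university press",
--     " academic press",
-- )
--
--
-- def is_excludable_year_mention(text: str, year: int) -> bool:
--     """
--     Scan for each occurrence of str(year) in the lowercased text and check
--     its local context: a copyright marker just before it, or a publisher
--     name just after it.
--     """
--     t = text.lower()
--     ys = str(year)
--     n = len(ys)
--     i = t.find(ys)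
--     while i != -1:
--         if t[:i].endswith("(c) ") or t[:i].endswith("\u00a9 "):
--             return True
--         rest = t[i + n:]
--         if any(rest.startswith(suf) for suf in _SUFFIXES):
--             return True
--         i = t.find(ys, i + 1)
--     return False
-- ===== Notes on version B (the rewrite author's own statement) =====
-- stated objective: faster
-- what changed: Instead of building eleven patterns and scanning the whole text once per pattern, B scans the lowered text once for occurrences of str(year) with a find-loop and checks each occurrence's local context (copyright marker immediately before, or publisher suffix immediately after).
import Mathlib
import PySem

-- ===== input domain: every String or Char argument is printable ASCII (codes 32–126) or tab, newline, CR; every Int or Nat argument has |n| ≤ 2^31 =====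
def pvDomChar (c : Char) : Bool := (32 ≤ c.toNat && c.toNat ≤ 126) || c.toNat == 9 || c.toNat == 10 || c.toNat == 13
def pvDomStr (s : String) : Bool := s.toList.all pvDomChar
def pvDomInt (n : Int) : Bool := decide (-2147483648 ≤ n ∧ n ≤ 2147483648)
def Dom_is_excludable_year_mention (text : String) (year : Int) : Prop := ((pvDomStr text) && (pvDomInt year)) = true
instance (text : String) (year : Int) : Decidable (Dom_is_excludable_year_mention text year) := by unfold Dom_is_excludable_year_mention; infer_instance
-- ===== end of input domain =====

-- B replaces A's eleven full-text substring scans by one scan for str(year) with a local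
-- context check at each occurrence (objective: faster, constant-factor).

-- ===== PORT A =====
-- literal transliteration of A: build the eleven patterns, lowercase the text, test `pat in text`.
def is_excludable_year_mention (text : String) (year : Int) : Bool :=
  let year_str := PySem.Int.toChars year
  let patterns : List (List Char) :=
    [ "(c) ".toList ++ year_str,
      "© ".toList ++ year_str,
      year_str ++ " elsevier".toList,
      year_str ++ " the authors".toList,
      year_str ++ " western social science".toList,
      year_str ++ " wiley".toList,
      year_str ++ " taylor & francis".toList,
      year_str ++ " springer".toList,
      year_str ++ " sage".toList,
      year_str ++ " oxford university press".toList,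
      year_str ++ " academic press".toList ]
  let text_lower := PySem.Chars.lower text.toList
  patterns.any (fun pat => PySem.Chars.isIn pat text_lower)

-- ===== PORT B =====
def pvSuffixes : List (List Char) :=
  [ " elsevier".toList,
    " the authors".toList,
    " western social science".toList,
    " wiley".toList,
    " taylor & francis".toList,
    " springer".toList,
    " sage".toList,
    " oxford university press".toList,
    " academic press".toList ]

-- bounds of str.find(sub, start) with a Nat start, cited by pvAltLoop's termination proof
lemma pvFindFrom_bounds (s sub : List Char) (k : Nat)
    (h : PySem.Chars.findFrom s sub (k : Int) ≠ -1) :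
    (k : Int) ≤ PySem.Chars.findFrom s sub (k : Int) ∧
      PySem.Chars.findFrom s sub (k : Int) ≤ (s.length : Int) := by
  have h1 := PySem.Chars.neg_one_le_find (List.drop k (List.take s.length s)) sub
  have h2 := PySem.Chars.find_le_length (List.drop k (List.take s.length s)) sub
  rw [show PySem.Chars.findFrom s sub (k : Int) = (if (s.length:Int) < (k:Int) then -1
      else if PySem.Chars.find (List.drop k (List.take s.length s)) sub = -1 then -1
      else (k:Int) + PySem.Chars.find (List.drop k (List.take s.length s)) sub) from by
    unfold PySem.Chars.findFrom
    show (if (s.length:Int) < (k:Int) then -1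
      else if PySem.Chars.find (List.drop ((k:Int)).toNat (List.take ((s.length:Int)).toNat s)) sub = -1 then -1
      else (k:Int) + PySem.Chars.find (List.drop ((k:Int)).toNat (List.take ((s.length:Int)).toNat s)) sub) = _
    simp] at h ⊢
  simp only [List.length_drop, List.length_take] at h1 h2
  split_ifs at h ⊢ <;> omega

-- the while-loop of B: i = t.find(ys, start); test context at i; continue from i+1
def pvAltCheck (t ys : List Char) (k : Nat) : Bool :=
  PySem.Chars.endswith (PySem.Chars.slice t none (some (k : Int))) "(c) ".toList ||
  PySem.Chars.endswith (PySem.Chars.slice t none (some (k : Int))) "© ".toList ||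
  pvSuffixes.any (fun suf =>
    PySem.Chars.startswith (PySem.Chars.slice t (some ((k : Int) + (ys.length : Int))) none) suf)

def pvAltLoop (t ys : List Char) (start : Nat) : Bool :=
  let j := PySem.Chars.findFrom t ys (start : Int)
  if h : j = -1 then false
  else if pvAltCheck t ys j.toNat then true
  else pvAltLoop t ys (j.toNat + 1)
termination_by t.length + 1 - start
decreasing_by
  have hb := pvFindFrom_bounds t ys start h
  omega

def is_excludable_year_mention_alt (text : String) (year : Int) : Bool :=
  let t := PySem.Chars.lower text.toList
  let ys := PySem.Int.toChars year
  pvAltLoop t ys 0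

-- ===== PRECONDITION & SPEC =====
def Spec_is_excludable_year_mention (text : String) (year : Int) (out : Bool) : Prop := out = is_excludable_year_mention_alt text year
instance (text : String) (year : Int) (out : Bool) : Decidable (Spec_is_excludable_year_mention text year out) := by unfold Spec_is_excludable_year_mention; infer_instance

-- ===== CLAIM (what is proved, stated in full; the proofs are below) =====
def Claim_equal_is_excludable_year_mention : Prop := ∀ (text : String) (year : Int), Dom_is_excludable_year_mention text year → Spec_is_excludable_year_mention text year (is_excludable_year_mention text year)

-- ===== LEMMAS AND PROOFS =====

lemma pvToChars_ne_nil (n : Int) : PySem.Int.toChars n ≠ [] := by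
  unfold PySem.Int.toChars
  split_ifs
  · simp
  · exact List.ne_nil_of_length_pos Nat.length_toDigits_pos

-- a prefix-marker pattern u ++ ys occurs in t iff ys occurs at some k with u ending t.take k
lemma pvKeyPre (t ys u : List Char) :
    (u ++ ys) <:+: t ↔ ∃ k, ys <+: t.drop k ∧ u <:+ t.take k := by
  constructor
  · rintro ⟨a, b, hab⟩
    refine ⟨a.length + u.length, ?_, ?_⟩
    · have : t.drop (a.length + u.length) = ys ++ b := by
        rw [← hab]
        rw [show a ++ (u ++ ys) ++ b = (a ++ u) ++ (ys ++ b) by simp]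
        rw [show a.length + u.length = (a ++ u).length by simp]
        exact List.drop_left
      rw [this]; exact List.prefix_append _ _
    · have : t.take (a.length + u.length) = a ++ u := by
        rw [← hab]
        rw [show a ++ (u ++ ys) ++ b = (a ++ u) ++ (ys ++ b) by simp]
        rw [show a.length + u.length = (a ++ u).length by simp]
        exact List.take_left
      rw [this]; exact List.suffix_append _ _
  · rintro ⟨k, ⟨r, hr⟩, ⟨p, hp⟩⟩
    refine ⟨p, r, ?_⟩
    calc p ++ (u ++ ys) ++ r = (p ++ u) ++ (ys ++ r) := by simp
    _ = t.take k ++ t.drop k := by rw [hp, hr]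
    _ = t := List.take_append_drop _ _

-- a suffix pattern ys ++ w occurs in t iff ys occurs at some k with w following at k + |ys|
lemma pvKeySuf (t ys w : List Char) :
    (ys ++ w) <:+: t ↔ ∃ k, ys <+: t.drop k ∧ w <+: t.drop (k + ys.length) := by
  constructor
  · rintro ⟨a, b, hab⟩
    refine ⟨a.length, ?_, ?_⟩
    · have : t.drop a.length = ys ++ (w ++ b) := by
        rw [← hab, show a ++ (ys ++ w) ++ b = a ++ (ys ++ (w ++ b)) by simp]
        exact List.drop_left
      rw [this]; exact List.prefix_append _ _
    · have : t.drop (a.length + ys.length) = w ++ b := by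
        rw [← hab]
        rw [show a ++ (ys ++ w) ++ b = (a ++ ys) ++ (w ++ b) by simp]
        rw [show a.length + ys.length = (a ++ ys).length by simp]
        exact List.drop_left
      rw [this]; exact List.prefix_append _ _
  · rintro ⟨k, ⟨r, hr⟩, ⟨q, hq⟩⟩
    have hrd : r = t.drop (k + ys.length) := by
      have : (ys ++ r).drop ys.length = (t.drop k).drop ys.length := by rw [hr]
      simpa [List.drop_drop, Nat.add_comm] using this
    refine ⟨t.take k, q, ?_⟩
    calc t.take k ++ (ys ++ w) ++ q = t.take k ++ (ys ++ (w ++ q)) := by simp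
    _ = t.take k ++ (ys ++ r) := by rw [hq, ← hrd]
    _ = t.take k ++ t.drop k := by rw [hr]
    _ = t := List.take_append_drop _ _

lemma pvAltLoop_iff (t ys : List Char) : ∀ (start : Nat), ys ≠ [] → start ≤ t.length →
    (pvAltLoop t ys start = true ↔
      ∃ k, start ≤ k ∧ ys <+: t.drop k ∧ pvAltCheck t ys k = true) := by
  intro start
  induction start using pvAltLoop.induct (t := t) (ys := ys) with
  | case1 start j hj =>
    intro hys hs
    have hj' : PySem.Chars.findFrom t ys (start : Int) = -1 := hj
    rw [pvAltLoop]
    simp only [hj', dif_pos, Bool.false_eq_true, false_iff]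
    rintro ⟨kk, hk1, hk2, _⟩
    refine (PySem.Chars.findFrom_natCast_eq_neg_one_iff t ys start hs).mp hj' ?_
    have hdd : t.drop kk = (t.drop start).drop (kk - start) := by
      rw [List.drop_drop]; congr 1; omega
    exact (hdd ▸ hk2).isInfix.trans (List.drop_suffix _ _).isInfix
  | case2 start j hj hc =>
    intro hys hs
    have hj' : PySem.Chars.findFrom t ys (start : Int) ≠ -1 := hj
    have hc' : pvAltCheck t ys (PySem.Chars.findFrom t ys (start : Int)).toNat = true := hc
    have hsp := PySem.Chars.findFrom_natCast_spec t ys start hs hj'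
    have hb := pvFindFrom_bounds t ys start hj'
    rw [pvAltLoop]
    simp only [hj', hc', dif_neg, if_true, not_false_iff, true_iff]
    exact ⟨(PySem.Chars.findFrom t ys (start : Int)).toNat, by omega, hsp.2.1, hc'⟩
  | case3 start j hj hc ih =>
    intro hys hs
    have hj' : PySem.Chars.findFrom t ys (start : Int) ≠ -1 := hj
    have hc' : ¬ pvAltCheck t ys (PySem.Chars.findFrom t ys (start : Int)).toNat = true := hc
    have ih' : ys ≠ [] → (PySem.Chars.findFrom t ys (start : Int)).toNat + 1 ≤ t.length →
        (pvAltLoop t ys ((PySem.Chars.findFrom t ys (start : Int)).toNat + 1) = true ↔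
          ∃ k, (PySem.Chars.findFrom t ys (start : Int)).toNat + 1 ≤ k ∧ ys <+: t.drop k ∧
            pvAltCheck t ys k = true) := ih
    have hsp := PySem.Chars.findFrom_natCast_spec t ys start hs hj'
    have hb := pvFindFrom_bounds t ys start hj'
    have hlt : (PySem.Chars.findFrom t ys (start : Int)).toNat < t.length := by
      rcases hsp.2.1 with ⟨r, hr⟩
      by_contra hge
      rw [List.drop_eq_nil_of_le (by omega)] at hr
      exact hys (List.append_eq_nil_iff.mp hr).1
    rw [pvAltLoop]
    simp only [hj', hc', dif_neg, not_false_iff, Bool.false_eq_true, if_neg]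
    rw [ih' hys (by omega)]
    constructor
    · rintro ⟨kk, hk1, hk2, hk3⟩
      exact ⟨kk, by omega, hk2, hk3⟩
    · rintro ⟨kk, hk1, hk2, hk3⟩
      refine ⟨kk, ?_, hk2, hk3⟩
      rcases Nat.lt_or_ge kk ((PySem.Chars.findFrom t ys (start : Int)).toNat) with hlt2 | hge2
      · exact absurd hk2 (hsp.2.2 kk hk1 hlt2)
      · rcases Nat.eq_or_lt_of_le hge2 with heq | hgt
        · exact absurd hk3 (by rw [heq] at hc'; exact hc')
        · omega
-- ===== VERDICT (by name: the statement is the Claim_ definition above) =====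
theorem is_excludable_year_mention_spec : Claim_equal_is_excludable_year_mention := by
  intro text year _
  unfold Spec_is_excludable_year_mention
  unfold is_excludable_year_mention is_excludable_year_mention_alt
  rw [Bool.eq_iff_iff]
  have hys := pvToChars_ne_nil year
  rw [pvAltLoop_iff (PySem.Chars.lower text.toList) (PySem.Int.toChars year) 0 hys (Nat.zero_le _)]
  simp only [List.any_cons, List.any_nil, Bool.or_eq_true, Bool.or_false,
    PySem.Chars.isIn_iff_infix, pvAltCheck, pvSuffixes,
    PySem.Chars.slice_eq_listSlice, ← Nat.cast_add, PySem.List.slice_to_natCast,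
    PySem.List.slice_from_natCast, PySem.Chars.endswith_iff, PySem.Chars.startswith_iff,
    Nat.zero_le, true_and, and_or_left, exists_or]
  rw [pvKeyPre, pvKeyPre, pvKeySuf, pvKeySuf, pvKeySuf, pvKeySuf, pvKeySuf, pvKeySuf,
    pvKeySuf, pvKeySuf, pvKeySuf]
  simp only [or_assoc]
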